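-- pv_equiv track=rewrite | github.com/Nauseouswave/CODED | uniCodePython/fintechApp/utils/goals.py | filter_investments_for_goal
-- ===== SOURCE A (Python) =====
-- from typing import List, Dict, Optional
--
-- def filter_investments_for_goal(investments: List[Dict], investment_filter: Dict) -> List[Dict]:
--     """Filter investments based on goal criteria"""
--     # Handle None or empty investments
--     if not investments:
--         return []
--
--     if not investment_filter:
--         return investments
--
--     filtered = []
--
--     for inv in investments:
--         include = True
--
--         # Filter by investment type
--         if 'investment_types' in investment_filter:
--             if inv['type'] not in investment_filter['investment_types']:
--                 include = False
--
--         # Filter by specific investments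
--         if 'specific_investments' in investment_filter:
--             if inv['name'] not in investment_filter['specific_investments']:
--                 include = False
--
--         # Filter by risk level
--         if 'risk_levels' in investment_filter:
--             if inv['risk_level'] not in investment_filter['risk_levels']:
--                 include = False
--
--         if include:
--             filtered.append(inv)
--
--     return filtered
-- ===== SOURCE B (Python) =====
-- def _apply_criterion(result, investment_filter, fkey, ikey):
--     if fkey in investment_filter:
--         allowed = investment_filter[fkey]
--         result = [inv for inv in result if inv[ikey] in allowed]
--     return result
--
--
-- def filter_investments_for_goal(investments, investment_filter):
--     """Filter investments based on goal criteria"""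
--     if not investments:
--         return []
--     if not investment_filter:
--         return investments
--     result = list(investments)
--     result = _apply_criterion(result, investment_filter, 'investment_types', 'type')
--     result = _apply_criterion(result, investment_filter, 'specific_investments', 'name')
--     result = _apply_criterion(result, investment_filter, 'risk_levels', 'risk_level')
--     return result
-- ===== Notes on version B (the rewrite author's own statement) =====
-- stated objective: alternative
-- what changed: B replaces A's single loop that maintains an include flag with three guarded checks per element by sequential per-criterion filtering passes, each key guard hoisted out of the loop.
import Mathlib
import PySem

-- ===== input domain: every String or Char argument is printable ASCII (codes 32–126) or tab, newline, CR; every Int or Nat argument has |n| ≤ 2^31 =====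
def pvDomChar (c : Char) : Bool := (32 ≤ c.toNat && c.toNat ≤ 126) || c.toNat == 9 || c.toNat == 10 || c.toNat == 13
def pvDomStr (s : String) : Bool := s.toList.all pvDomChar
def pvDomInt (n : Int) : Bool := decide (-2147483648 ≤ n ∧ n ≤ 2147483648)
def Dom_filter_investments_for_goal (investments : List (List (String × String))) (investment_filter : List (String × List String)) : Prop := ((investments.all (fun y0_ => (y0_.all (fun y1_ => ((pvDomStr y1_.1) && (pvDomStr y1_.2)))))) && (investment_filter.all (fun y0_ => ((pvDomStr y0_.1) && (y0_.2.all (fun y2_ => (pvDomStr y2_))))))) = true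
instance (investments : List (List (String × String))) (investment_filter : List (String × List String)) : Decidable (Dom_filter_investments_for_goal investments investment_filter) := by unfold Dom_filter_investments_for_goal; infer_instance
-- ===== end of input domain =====

-- B replaces A's single loop with a per-element include flag by three sequential
-- per-criterion filtering passes (each key guard hoisted out of the loop); same cost, different decomposition.


-- shared dict primitives ('k in d' and 'd[k]', first match; exact for Python dicts, whose keys are unique)
def pvKeyIn {ν : Type} (d : List (String × ν)) (k : String) : Bool := d.any (fun p => p.1 == k)
def pvGetS (d : List (String × String)) (k : String) : String := ((d.find? (fun p => p.1 == k)).map Prod.snd).getD ""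
def pvGetL (d : List (String × List String)) (k : String) : List String := ((d.find? (fun p => p.1 == k)).map Prod.snd).getD []

-- ===== PORT A =====
def filter_investments_for_goal (investments : List (List (String × String))) (investment_filter : List (String × List String)) : List (List (String × String)) :=
  if investments = [] then []
  else if investment_filter = [] then investments
  else
    investments.foldl (fun filtered inv =>
      let include0 : Bool := true
      let include1 : Bool :=
        if pvKeyIn investment_filter "investment_types" then
          (if !((pvGetL investment_filter "investment_types").contains (pvGetS inv "type")) then false else include0)
        else include0
      let include2 : Bool :=
        if pvKeyIn investment_filter "specific_investments" then
          (if !((pvGetL investment_filter "specific_investments").contains (pvGetS inv "name")) then false else include1)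
        else include1
      let include3 : Bool :=
        if pvKeyIn investment_filter "risk_levels" then
          (if !((pvGetL investment_filter "risk_levels").contains (pvGetS inv "risk_level")) then false else include2)
        else include2
      if include3 then filtered ++ [inv] else filtered) []

-- ===== PORT B =====
def pvApplyCriterion (result : List (List (String × String))) (investment_filter : List (String × List String)) (fkey ikey : String) : List (List (String × String)) :=
  if pvKeyIn investment_filter fkey then
    let allowed := pvGetL investment_filter fkey
    result.filter (fun inv => allowed.contains (pvGetS inv ikey))
  else result

def filter_investments_for_goal_alt (investments : List (List (String × String))) (investment_filter : List (String × List String)) : List (List (String × String)) :=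
  if investments = [] then []
  else if investment_filter = [] then investments
  else
    pvApplyCriterion
      (pvApplyCriterion
        (pvApplyCriterion investments investment_filter "investment_types" "type")
        investment_filter "specific_investments" "name")
      investment_filter "risk_levels" "risk_level"

-- ===== PRECONDITION & SPEC =====
-- Pre_ excludes exactly the inputs on which A raises KeyError: a criterion key present in the
-- (non-empty) filter while some investment lacks the corresponding field.
def Pre_filter_investments_for_goal (investments : List (List (String × String))) (investment_filter : List (String × List String)) : Prop :=
  investments = [] ∨ investment_filter = [] ∨
  ((pvKeyIn investment_filter "investment_types" = true → ∀ inv ∈ investments, pvKeyIn inv "type" = true) ∧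
   (pvKeyIn investment_filter "specific_investments" = true → ∀ inv ∈ investments, pvKeyIn inv "name" = true) ∧
   (pvKeyIn investment_filter "risk_levels" = true → ∀ inv ∈ investments, pvKeyIn inv "risk_level" = true))
instance (investments : List (List (String × String))) (investment_filter : List (String × List String)) : Decidable (Pre_filter_investments_for_goal investments investment_filter) := by unfold Pre_filter_investments_for_goal; infer_instance

def pvWitness_filter_investments_for_goal : (List (List (String × String))) × (List (String × List String)) :=
  ([[("type", "stock"), ("name", "acme"), ("risk_level", "low")]], [("investment_types", ["stock", "bond"])])

def Spec_filter_investments_for_goal (investments : List (List (String × String))) (investment_filter : List (String × List String)) (out : List (List (String × String))) : Prop := out = filter_investments_for_goal_alt investments investment_filter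
instance (investments : List (List (String × String))) (investment_filter : List (String × List String)) (out : List (List (String × String))) : Decidable (Spec_filter_investments_for_goal investments investment_filter out) := by unfold Spec_filter_investments_for_goal; infer_instance

-- ===== CLAIM (what is proved, stated in full; the proofs are below) =====
def Claim_equal_filter_investments_for_goal : Prop := ∀ (investments : List (List (String × String))) (investment_filter : List (String × List String)), Dom_filter_investments_for_goal investments investment_filter → Pre_filter_investments_for_goal investments investment_filter → Spec_filter_investments_for_goal investments investment_filter (filter_investments_for_goal investments investment_filter)

-- ===== LEMMAS AND PROOFS =====

theorem filter_investments_main (investments : List (List (String × String))) (investment_filter : List (String × List String)) :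
    Spec_filter_investments_for_goal investments investment_filter (filter_investments_for_goal investments investment_filter) := by
  unfold Spec_filter_investments_for_goal filter_investments_for_goal filter_investments_for_goal_alt
  by_cases he : investments = [] <;> simp only [he, if_pos, reduceIte]
  by_cases hf : investment_filter = [] <;> simp only [hf, reduceIte]
  rw [PySem.List.foldl_append_if_eq_filter]
  simp only [List.nil_append]
  unfold pvApplyCriterion
  by_cases h1 : pvKeyIn investment_filter "investment_types" = true <;>
  by_cases h2 : pvKeyIn investment_filter "specific_investments" = true <;>
  by_cases h3 : pvKeyIn investment_filter "risk_levels" = true <;>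
    simp [h1, h2, h3, List.filter_filter]

-- ===== VERDICT (by name: the statement is the Claim_ definition above) =====
theorem filter_investments_for_goal_spec : Claim_equal_filter_investments_for_goal := by
  intro investments investment_filter _ _
  exact filter_investments_main investments investment_filter
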